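-- pv_equiv track=rewrite | github.com/balamuruganCT/tutorials | moveNegativeElementsEnd/negativeMove.py | nMove
-- ===== SOURCE A (Python) =====
-- def nMove(A):
--     # TODO Code here.
--     sortedList = []
--     for i in A:
--         sorLength = len(sortedList)
--         if i < 0:
--             sortedList.insert(sorLength, i)
--         else:
--             sortedList.insert(0, i)
--     return sortedList
-- ===== SOURCE B (Python) =====
-- def nMove(A):
--     # One pass: collect non-negatives and negatives separately,
--     # then reversed non-negatives followed by negatives in order.
--     front = []
--     back = []
--     for i in A:
--         if i < 0:
--             back.append(i)
--         else:
--             front.append(i)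
--     return front[::-1] + back
-- ===== Notes on version B (the rewrite author's own statement) =====
-- stated objective: faster
-- what changed: Replaces repeated list.insert(0, ...) front insertions (each O(n)) with a single pass partitioning into two appended lists, returning reversed non-negatives plus negatives.
import Mathlib
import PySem

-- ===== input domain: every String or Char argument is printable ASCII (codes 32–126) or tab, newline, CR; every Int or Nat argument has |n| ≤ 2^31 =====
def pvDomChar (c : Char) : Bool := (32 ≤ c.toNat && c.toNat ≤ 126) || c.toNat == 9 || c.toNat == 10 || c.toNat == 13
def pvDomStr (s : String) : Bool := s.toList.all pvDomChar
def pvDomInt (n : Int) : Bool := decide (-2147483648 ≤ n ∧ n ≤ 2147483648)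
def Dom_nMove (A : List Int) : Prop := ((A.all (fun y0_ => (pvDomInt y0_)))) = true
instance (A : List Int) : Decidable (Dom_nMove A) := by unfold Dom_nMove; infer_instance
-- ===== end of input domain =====

-- ===== PORT A =====
-- port of A: fold inserting each element at position len (negatives) or 0 (non-negatives)
def nMove (A : List Int) : List Int :=
  A.foldl (fun sortedList i =>
    if i < 0 then PySem.List.insert sortedList (sortedList.length : Int) i
    else PySem.List.insert sortedList 0 i) []

-- ===== PORT B =====
-- port of B: one pass partitioning into (front, back), then front reversed ++ back
def nMove_alt (A : List Int) : List Int :=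
  let p := A.foldl (fun (fb : List Int × List Int) i =>
    if i < 0 then (fb.1, fb.2 ++ [i]) else (fb.1 ++ [i], fb.2)) ([], [])
  p.1.reverse ++ p.2

-- ===== PRECONDITION & SPEC =====
def Spec_nMove (A : List Int) (out : List Int) : Prop := out = nMove_alt A
instance (A : List Int) (out : List Int) : Decidable (Spec_nMove A out) := by unfold Spec_nMove; infer_instance

-- ===== CLAIM (what is proved, stated in full; the proofs are below) =====
def Claim_equal_nMove : Prop := ∀ (A : List Int), Dom_nMove A → Spec_nMove A (nMove A)

-- ===== LEMMAS AND PROOFS =====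

-- ===== VERDICT (by name: the statement is the Claim_ definition above) =====
-- loop invariant: A's accumulator equals front.reverse ++ back of B's fold state
theorem nMove_inv (A : List Int) (f b : List Int) :
    A.foldl (fun sortedList i =>
      if i < 0 then PySem.List.insert sortedList (sortedList.length : Int) i
      else PySem.List.insert sortedList 0 i) (f.reverse ++ b)
    = (let p := A.foldl (fun (fb : List Int × List Int) i =>
        if i < 0 then (fb.1, fb.2 ++ [i]) else (fb.1 ++ [i], fb.2)) (f, b)
       p.1.reverse ++ p.2) := by
  induction A generalizing f b with
  | nil => simp
  | cons x xs ih =>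
    simp only [List.foldl_cons]
    by_cases h : x < 0
    · rw [if_pos h, if_pos h, PySem.List.insert_length, List.append_assoc]
      simpa using ih f (b ++ [x])
    · rw [if_neg h, if_neg h, PySem.List.insert_zero]
      have hx : x :: (f.reverse ++ b) = (f ++ [x]).reverse ++ b := by simp
      rw [hx]
      simpa using ih (f ++ [x]) b

-- ===== VERDICT (by name: the statement is the Claim_ definition above) =====
theorem nMove_spec : Claim_equal_nMove := by
  intro A _
  unfold Spec_nMove nMove nMove_alt
  simpa using nMove_inv A [] []
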